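-- pv_equiv track=rewrite | github.com/SeungjipLee/Algorithm | 배준형/Week12/Prog_Lv3.불량 사용자.py | id_check
-- ===== SOURCE A (Python) =====
-- def id_check(b_id, user_id):
--     result = []
--     length = len(b_id)
--     for i, u_id in enumerate(user_id):
--         if len(u_id) != length:
--             continue
--         for idx, each in enumerate(b_id):
--             if each == "*":
--                 continue
--             if u_id[idx] != each:
--                 break
--         else:
--             result.append(i)
--
--     return result
-- ===== SOURCE B (Python) =====
-- def id_check(b_id, user_id):
--     # Inverted nesting: start from all users of the right length as a candidate
--     # pool, then sweep the pattern position by position, pruning the pool at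
--     # every non-wildcard position. Survivors are exactly the matches, in order.
--     n = len(b_id)
--     cand = [(i, u) for i, u in enumerate(user_id) if len(u) == n]
--     for idx, ch in enumerate(b_id):
--         if ch != '*':
--             cand = [(i, u) for i, u in cand if u[idx] == ch]
--     return [i for i, u in cand]
-- ===== Notes on version B (the rewrite author's own statement) =====
-- stated objective: alternative
-- what changed: B inverts the loop nesting: instead of A's per-user inner scan over the pattern with break/for-else, B builds a candidate pool of right-length users and sweeps the pattern once, pruning the pool at each non-wildcard position.
import Mathlib
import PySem

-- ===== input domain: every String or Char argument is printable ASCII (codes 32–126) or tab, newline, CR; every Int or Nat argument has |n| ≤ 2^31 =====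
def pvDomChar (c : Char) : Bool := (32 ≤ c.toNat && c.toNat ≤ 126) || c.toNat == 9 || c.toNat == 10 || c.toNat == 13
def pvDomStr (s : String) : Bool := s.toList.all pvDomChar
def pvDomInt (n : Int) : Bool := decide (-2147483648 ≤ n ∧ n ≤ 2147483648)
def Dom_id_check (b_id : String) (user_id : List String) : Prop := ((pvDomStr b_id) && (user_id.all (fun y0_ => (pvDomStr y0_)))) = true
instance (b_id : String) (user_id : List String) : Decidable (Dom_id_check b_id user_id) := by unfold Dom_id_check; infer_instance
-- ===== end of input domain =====

-- B inverts the loop nesting: a candidate pool of right-length users is pruned by one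
-- sweep over the pattern's non-wildcard positions (alternative decomposition, same cost).

-- ===== PORT A =====
-- inner 'for idx, each in enumerate(b_id): … break / else' loop; true = reached the else
def pvInnerA (u : String) : List (Int × Char) → Bool
  | [] => true
  | (idx, each) :: t =>
    if each = '*' then pvInnerA u t
    else if PySem.Str.pyGet? u idx ≠ some each then false
    else pvInnerA u t

def id_check (b_id : String) (user_id : List String) : List Int :=
  (PySem.List.enumerate user_id).foldl
    (fun result p =>
      if PySem.Str.len p.2 ≠ PySem.Str.len b_id then result
      else if pvInnerA p.2 (PySem.List.enumerate b_id.toList) then result ++ [p.1]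
      else result)
    []

-- ===== PORT B =====
def id_check_alt (b_id : String) (user_id : List String) : List Int :=
  let n := PySem.Str.len b_id
  let cand := (PySem.List.enumerate user_id).filter (fun p => PySem.Str.len p.2 == n)
  let cand := (PySem.List.enumerate b_id.toList).foldl
    (fun cand q =>
      if q.2 ≠ '*' then cand.filter (fun p => PySem.Str.pyGet? p.2 q.1 == some q.2)
      else cand) cand
  cand.map (fun p => p.1)

-- ===== PRECONDITION & SPEC =====
def Spec_id_check (b_id : String) (user_id : List String) (out : List Int) : Prop := out = id_check_alt b_id user_id
instance (b_id : String) (user_id : List String) (out : List Int) : Decidable (Spec_id_check b_id user_id out) := by unfold Spec_id_check; infer_instance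

-- ===== CLAIM (what is proved, stated in full; the proofs are below) =====
def Claim_equal_id_check : Prop := ∀ (b_id : String) (user_id : List String), Dom_id_check b_id user_id → Spec_id_check b_id user_id (id_check b_id user_id)

-- ===== LEMMAS AND PROOFS =====
-- A's inner break/else loop decides the conjunction over all pattern positions.
theorem pvInnerA_eq_all (u : String) (l : List (Int × Char)) :
    pvInnerA u l = l.all (fun q => q.2 == '*' || PySem.Str.pyGet? u q.1 == some q.2) := by
  induction l with
  | nil => rfl
  | cons h t ih =>
    obtain ⟨idx, each⟩ := h
    by_cases hs : each = '*'
    · simp [pvInnerA, hs, ih]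
    · by_cases hg : PySem.Str.pyGet? u idx = some each
      · simp only [PySem.Str.pyGet?, PySem.Chars.pyGet?_eq_listPyGet?] at hg
        simp [pvInnerA, hs, hg, ih]
      · simp only [PySem.Str.pyGet?, PySem.Chars.pyGet?_eq_listPyGet?] at hg
        simp [pvInnerA, hs, hg]

-- A's append-if fold produces the sublist of first components of the selected pairs.
theorem pv_foldA {α : Type} (c : α → Bool) (f : α → Int) (l : List α) (acc : List Int) :
    l.foldl (fun r p => if c p then r ++ [f p] else r) acc
      = acc ++ (l.filter c).map f := by
  induction l generalizing acc with
  | nil => simp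
  | cons h t ih =>
    by_cases hc : c h <;> simp [hc, ih]

-- B's staged pruning fold equals one filter by the conjunction over the sweep list.
theorem pv_foldB {α : Type} (g : α → Int × Char → Bool) (L : List (Int × Char)) (cand : List α) :
    L.foldl (fun cand q => if q.2 ≠ '*' then cand.filter (fun p => g p q) else cand) cand
      = cand.filter (fun p => L.all (fun q => q.2 == '*' || g p q)) := by
  induction L generalizing cand with
  | nil => simp
  | cons h t ih =>
    rw [List.foldl_cons]
    by_cases hs : h.2 = '*'
    · rw [if_neg (by simp [hs]), ih]
      congr 1
      funext p
      simp [hs]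
    · rw [if_pos (by simp [hs]), ih, List.filter_filter]
      congr 1
      funext p
      have hb : (h.2 == '*') = false := by simp [hs]
      simp [List.all_cons, hb, Bool.and_comm]

-- ===== VERDICT (by name: the statement is the Claim_ definition above) =====
theorem id_check_spec : Claim_equal_id_check := by
  intro b_id user_id _
  unfold Spec_id_check id_check id_check_alt
  simp only [pv_foldB]
  rw [List.filter_filter]
  have := pv_foldA
    (fun p : Int × String =>
      !decide (PySem.Str.len p.2 ≠ PySem.Str.len b_id) &&
        pvInnerA p.2 (PySem.List.enumerate b_id.toList))
    (fun p => p.1) (PySem.List.enumerate user_id) []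
  simp only [List.nil_append] at this ⊢
  rw [show (fun r (p : Int × String) =>
        if PySem.Str.len p.2 ≠ PySem.Str.len b_id then r
        else if pvInnerA p.2 (PySem.List.enumerate b_id.toList) then r ++ [p.1] else r)
      = (fun r p =>
        if (!decide (PySem.Str.len p.2 ≠ PySem.Str.len b_id) &&
            pvInnerA p.2 (PySem.List.enumerate b_id.toList)) then r ++ [p.1] else r) from by
      funext r p
      by_cases h1 : PySem.Str.len p.2 ≠ PySem.Str.len b_id <;>
        by_cases h2 : pvInnerA p.2 (PySem.List.enumerate b_id.toList) <;> simp [h1, h2]]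
  rw [this]
  congr 1
  congr 1
  funext p
  simp only [pvInnerA_eq_all]
  by_cases h1 : p.2.length = b_id.length
  · simp [PySem.Str.len, h1, Bool.and_comm]
  · simp [PySem.Str.len, h1]
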